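-- pv_equiv track=rewrite | github.com/nperera0/finite-state-machine | fsm.py | _validate_transitions
-- ===== SOURCE A (Python) =====
-- def _validate_transitions(
--     states: list[str],
--     alphabet: list[str],
--     transitions: dict[str, dict[str, str]]
-- ) -> bool:
--     if not transitions:
--         return False
--
--     for state, trans in transitions.items():
--         if state not in states:
--             return False
--         for symbol, target in trans.items():
--             if symbol not in alphabet or target not in states:
--                 return False
--     return True
-- ===== SOURCE B (Python) =====
-- def _validate_transitions(
--     states: list[str],
--     alphabet: list[str],
--     transitions: dict[str, dict[str, str]]
-- ) -> bool:
--     if not transitions: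
--         return False
--     used_states = set()
--     used_symbols = set()
--     for state, trans in transitions.items():
--         used_states.add(state)
--         for symbol, target in trans.items():
--             used_states.add(target)
--             used_symbols.add(symbol)
--     return used_states <= set(states) and used_symbols <= set(alphabet)
-- ===== Notes on version B (the rewrite author's own statement) =====
-- stated objective: alternative
-- what changed: Replaces the per-element membership checks with early returns by a single gathering pass that accumulates the sets of used states/targets and used symbols, followed by two whole-set subset comparisons at the end (no early exit, no per-element branch).
import Mathlib
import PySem

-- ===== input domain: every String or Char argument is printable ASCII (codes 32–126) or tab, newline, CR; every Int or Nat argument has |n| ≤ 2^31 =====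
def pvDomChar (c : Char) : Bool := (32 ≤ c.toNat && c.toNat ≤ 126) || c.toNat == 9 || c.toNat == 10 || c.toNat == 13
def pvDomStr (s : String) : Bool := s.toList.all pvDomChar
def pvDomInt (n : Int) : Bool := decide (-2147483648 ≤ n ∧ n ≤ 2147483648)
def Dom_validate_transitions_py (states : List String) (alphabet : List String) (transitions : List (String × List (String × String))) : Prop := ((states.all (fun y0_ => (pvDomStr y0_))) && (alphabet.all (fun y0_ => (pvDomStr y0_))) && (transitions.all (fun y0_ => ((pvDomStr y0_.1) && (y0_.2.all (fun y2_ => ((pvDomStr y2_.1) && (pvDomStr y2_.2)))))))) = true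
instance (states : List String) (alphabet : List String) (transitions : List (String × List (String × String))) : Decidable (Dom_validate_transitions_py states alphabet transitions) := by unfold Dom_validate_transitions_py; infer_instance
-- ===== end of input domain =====

-- B replaces A's per-element membership checks with early return by one gathering pass
-- (sets of used states/targets and used symbols) followed by two subset comparisons (alternative decomposition, same cost).


-- ===== PORT A =====
-- inner 'for symbol, target in trans.items()' loop with its early 'return False'
def vtAInner (states : List String) (alphabet : List String) : List (String × String) → Bool
  | [] => true
  | (symbol, target) :: rest =>
      if !(alphabet.contains symbol) || !(states.contains target) then false
      else vtAInner states alphabet rest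

-- outer 'for state, trans in transitions.items()' loop with its early 'return False'
def vtAOuter (states : List String) (alphabet : List String) : List (String × List (String × String)) → Bool
  | [] => true
  | (st, tr) :: rest =>
      if !(states.contains st) then false
      else if vtAInner states alphabet tr then vtAOuter states alphabet rest
      else false

def validate_transitions_py (states : List String) (alphabet : List String) (transitions : List (String × List (String × String))) : Bool :=
  if transitions = [] then false
  else vtAOuter states alphabet transitions

-- ===== PORT B =====
-- single gathering pass: accumulate (used_states, used_symbols)
def vtGather (transitions : List (String × List (String × String))) : PySem.Set String × PySem.Set String :=
  transitions.foldl
    (fun acc p =>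
      p.2.foldl (fun a q => (PySem.Set.add a.1 q.2, PySem.Set.add a.2 q.1))
        (PySem.Set.add acc.1 p.1, acc.2))
    (PySem.Set.empty, PySem.Set.empty)

def validate_transitions_py_alt (states : List String) (alphabet : List String) (transitions : List (String × List (String × String))) : Bool :=
  if transitions = [] then false
  else
    let used := vtGather transitions
    PySem.Set.issubset used.1 (PySem.Set.ofList states) &&
      PySem.Set.issubset used.2 (PySem.Set.ofList alphabet)

-- ===== PRECONDITION & SPEC =====
def Spec_validate_transitions_py (states : List String) (alphabet : List String) (transitions : List (String × List (String × String))) (out : Bool) : Prop := out = validate_transitions_py_alt states alphabet transitions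
instance (states : List String) (alphabet : List String) (transitions : List (String × List (String × String))) (out : Bool) : Decidable (Spec_validate_transitions_py states alphabet transitions out) := by unfold Spec_validate_transitions_py; infer_instance

-- ===== CLAIM (what is proved, stated in full; the proofs are below) =====
def Claim_equal_validate_transitions_py : Prop := ∀ (states : List String) (alphabet : List String) (transitions : List (String × List (String × String))), Dom_validate_transitions_py states alphabet transitions → Spec_validate_transitions_py states alphabet transitions (validate_transitions_py states alphabet transitions)

-- ===== LEMMAS AND PROOFS =====

-- adding an element to a set conjoins its check onto an 'all' over the set
theorem vt_all_add {s : PySem.Set String} {x : String} {P : String → Bool} :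
    (PySem.Set.add s x).all P = (s.all P && P x) := by
  rw [PySem.Set.add_eq_ite]
  by_cases hx : x ∈ s
  · simp only [if_pos hx]
    cases hall : s.all P
    · simp
    · simp [List.all_eq_true.mp hall x hx]
  · simp [if_neg hx, List.all_append]

-- inner fold invariant
theorem vt_inner_inv (Pst Psy : String → Bool) (l : List (String × String))
    (acc : PySem.Set String × PySem.Set String) :
    ((l.foldl (fun a q => (PySem.Set.add a.1 q.2, PySem.Set.add a.2 q.1)) acc).1.all Pst &&
     (l.foldl (fun a q => (PySem.Set.add a.1 q.2, PySem.Set.add a.2 q.1)) acc).2.all Psy)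
    = (acc.1.all Pst && acc.2.all Psy && l.all (fun q => Psy q.1 && Pst q.2)) := by
  induction l generalizing acc with
  | nil => simp
  | cons q rest ih =>
    simp only [List.foldl_cons, List.all_cons]
    rw [ih]
    simp only [vt_all_add]
    cases acc.1.all Pst <;> cases acc.2.all Psy <;> cases Psy q.1 <;> cases Pst q.2 <;> simp

-- outer fold invariant
theorem vt_outer_inv (Pst Psy : String → Bool) (ts : List (String × List (String × String)))
    (acc : PySem.Set String × PySem.Set String) :
    ((ts.foldl (fun acc p => p.2.foldl (fun a q => (PySem.Set.add a.1 q.2, PySem.Set.add a.2 q.1))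
          (PySem.Set.add acc.1 p.1, acc.2)) acc).1.all Pst &&
     (ts.foldl (fun acc p => p.2.foldl (fun a q => (PySem.Set.add a.1 q.2, PySem.Set.add a.2 q.1))
          (PySem.Set.add acc.1 p.1, acc.2)) acc).2.all Psy)
    = (acc.1.all Pst && acc.2.all Psy &&
        ts.all (fun p => Pst p.1 && p.2.all (fun q => Psy q.1 && Pst q.2))) := by
  induction ts generalizing acc with
  | nil => simp
  | cons p rest ih =>
    simp only [List.foldl_cons, List.all_cons]
    rw [ih, vt_inner_inv]
    simp only [vt_all_add]
    cases acc.1.all Pst <;> cases acc.2.all Psy <;> cases Pst p.1 <;>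
      cases p.2.all (fun q => Psy q.1 && Pst q.2) <;> simp

-- A's inner loop computes an 'all'
theorem vt_inner_eq_all (states alphabet : List String) (l : List (String × String)) :
    vtAInner states alphabet l = l.all (fun q => alphabet.contains q.1 && states.contains q.2) := by
  induction l with
  | nil => rfl
  | cons q rest ih =>
    obtain ⟨symbol, target⟩ := q
    simp only [vtAInner, List.all_cons, ih]
    cases alphabet.contains symbol <;> cases states.contains target <;> simp

-- A's outer loop computes an 'all'
theorem vt_outer_eq_all (states alphabet : List String) (ts : List (String × List (String × String))) :
    vtAOuter states alphabet ts =
      ts.all (fun p => states.contains p.1 &&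
        p.2.all (fun q => alphabet.contains q.1 && states.contains q.2)) := by
  induction ts with
  | nil => rfl
  | cons p rest ih =>
    obtain ⟨st, tr⟩ := p
    simp only [vtAOuter, List.all_cons, ih, vt_inner_eq_all]
    cases states.contains st <;>
      cases tr.all (fun q => alphabet.contains q.1 && states.contains q.2) <;> simp

-- ===== VERDICT (by name: the statement is the Claim_ definition above) =====
theorem validate_transitions_py_spec : Claim_equal_validate_transitions_py := by
  intro states alphabet transitions _
  unfold Spec_validate_transitions_py validate_transitions_py validate_transitions_py_alt
  by_cases h : transitions = []
  · simp [h]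
  · simp only [if_neg h, vtGather, PySem.Set.issubset]
    have := vt_outer_inv (fun x => (PySem.Set.ofList states).contains x)
      (fun x => (PySem.Set.ofList alphabet).contains x) transitions
      (PySem.Set.empty, PySem.Set.empty)
    rw [vt_outer_eq_all, this]
    simp [PySem.Set.empty]
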